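-- pv_equiv track=rewrite | github.com/KevZ3742/Codeforces | 1829D.py | solve
-- ===== SOURCE A (Python) =====
-- def solve(n, m, dp):
--     if n == m:
--         return True
--
--     if n < m or n % 3 != 0:
--         return False
--
--     if n in dp:
--         return dp[n]
--
--     l = n * 2 // 3
--     r = n // 3
--
--     dp[n] = solve(l, m, dp) or solve(r, m, dp)
--     return dp[n]
-- ===== SOURCE B (Python) =====
-- def solve(n, m, dp):
--     # Iterative breadth-first frontier search instead of memoized recursion.
--     # Return-value equivalent to A; does NOT mutate dp (A inserts memo entries).
--     frontier = {n}
--     while frontier: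
--         children = set()
--         for v in frontier:
--             if v == m:
--                 return True
--             if v < m or v % 3 != 0:
--                 continue
--             if v in dp:
--                 if dp[v]:
--                     return True
--                 continue
--             children.add(v * 2 // 3)
--             children.add(v // 3)
--         frontier = children
--     return False
-- ===== Notes on version B (the rewrite author's own statement) =====
-- stated objective: alternative
-- what changed: Replaces A's memoized top-down recursion (which mutates dp with partial memo entries) by an iterative breadth-first frontier search with a per-layer set for deduplication that leaves dp untouched; equivalence is for the return value only.
import Mathlib
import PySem

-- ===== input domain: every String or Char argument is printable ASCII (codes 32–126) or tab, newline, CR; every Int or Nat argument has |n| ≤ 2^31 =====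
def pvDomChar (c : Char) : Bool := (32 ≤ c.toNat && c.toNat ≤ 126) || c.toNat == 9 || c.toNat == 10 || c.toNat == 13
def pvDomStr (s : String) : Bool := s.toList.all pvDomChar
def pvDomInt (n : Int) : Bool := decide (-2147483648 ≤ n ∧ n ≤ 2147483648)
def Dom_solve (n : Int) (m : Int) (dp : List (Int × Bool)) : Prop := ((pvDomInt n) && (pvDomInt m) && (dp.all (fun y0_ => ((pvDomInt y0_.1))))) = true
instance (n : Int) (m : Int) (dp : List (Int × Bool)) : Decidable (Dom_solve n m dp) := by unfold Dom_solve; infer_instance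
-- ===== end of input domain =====

-- B replaces A's memoized recursion by an iterative breadth-first frontier search (per-layer set
-- dedup); equivalence is about the RETURN value only: A mutates dp (memo inserts), B leaves it unchanged.

-- ===== PORT A =====
-- A's recursion, with dp threaded through (Python mutates the dict).  The fuel argument only makes
-- the recursion structurally total; n.natAbs + 1 levels always suffice on inputs admitted by Pre_.
def solveA : Nat → Int → Int → PySem.Dict Int Bool → Bool × PySem.Dict Int Bool
  | 0, _, _, dp => (false, dp)
  | fuel+1, n, m, dp =>
    if n = m then (true, dp)
    else if n < m ∨ PySem.Int.mod n 3 ≠ 0 then (false, dp)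
    else
      match dp.get? n with
      | some b => (b, dp)
      | none =>
        let l := PySem.Int.floordiv (n * 2) 3
        let r := PySem.Int.floordiv n 3
        let p1 := solveA fuel l m dp
        if p1.1 then (true, p1.2.insert n true)
        else
          let p2 := solveA fuel r m p1.2
          (p2.1, p2.2.insert n p2.1)

def solve (n : Int) (m : Int) (dp : List (Int × Bool)) : Bool :=
  (solveA (n.natAbs + 1) n m (PySem.Dict.mk dp)).1

-- ===== PORT B =====
-- one pass of B's inner 'for v in frontier' loop: 'none' = the Python 'return True';
-- 'some acc' = the accumulated children set when the loop falls through
def stepB (m : Int) (d : PySem.Dict Int Bool) : List Int → PySem.Set Int → Option (PySem.Set Int)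
  | [], acc => some acc
  | v :: rest, acc =>
    if v = m then none
    else if v < m ∨ PySem.Int.mod v 3 ≠ 0 then stepB m d rest acc
    else
      match d.get? v with
      | some b => if b then none else stepB m d rest acc
      | none =>
        stepB m d rest ((acc.add (PySem.Int.floordiv (v * 2) 3)).add (PySem.Int.floordiv v 3))

-- B's 'while frontier' loop (fuel makes it structurally total; n.natAbs + 1 layers suffice under Pre_)
def loopB (m : Int) (d : PySem.Dict Int Bool) : Nat → PySem.Set Int → Bool
  | 0, _ => false
  | fuel+1, frontier =>
    if frontier = [] then false
    else
      match stepB m d frontier PySem.Set.empty with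
      | none => true
      | some children => loopB m d fuel children

def solve_alt (n : Int) (m : Int) (dp : List (Int × Bool)) : Bool :=
  loopB m (PySem.Dict.mk dp) (n.natAbs + 1) (PySem.Set.ofList [n])

-- ===== PRECONDITION & SPEC =====
-- Pre_ excludes only n = 0 with m < 0 and no memo entry for 0: there A recurses on
-- solve(0, m, dp) forever and raises RecursionError (B loops as well); A returns on everything else.
def Pre_solve (n : Int) (m : Int) (dp : List (Int × Bool)) : Prop :=
  n = 0 → (0 ≤ m ∨ (0 : Int) ∈ dp.map Prod.fst)
instance (n : Int) (m : Int) (dp : List (Int × Bool)) : Decidable (Pre_solve n m dp) := by unfold Pre_solve; infer_instance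

def pvWitness_solve : Int × Int × (List (Int × Bool)) := (18, 4, [(6, false)])

def Spec_solve (n : Int) (m : Int) (dp : List (Int × Bool)) (out : Bool) : Prop := out = solve_alt n m dp
instance (n : Int) (m : Int) (dp : List (Int × Bool)) (out : Bool) : Decidable (Spec_solve n m dp out) := by unfold Spec_solve; infer_instance

-- ===== CLAIM (what is proved, stated in full; the proofs are below) =====
def Claim_equal_solve : Prop := ∀ (n : Int) (m : Int) (dp : List (Int × Bool)), Dom_solve n m dp → Pre_solve n m dp → Spec_solve n m dp (solve n m dp)

-- ===== LEMMAS AND PROOFS =====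

-- the pure (memo-free) value both programs compute, fuelled per node
def pureF : Nat → Int → Int → PySem.Dict Int Bool → Bool
  | 0, _, _, _ => false
  | fuel+1, n, m, d =>
    if n = m then true
    else if n < m ∨ PySem.Int.mod n 3 ≠ 0 then false
    else
      match d.get? n with
      | some b => b
      | none => pureF fuel (PySem.Int.floordiv (n * 2) 3) m d || pureF fuel (PySem.Int.floordiv n 3) m d

-- arithmetic on the two children of a node divisible by 3
lemma child_arith (n : Int) (h3 : PySem.Int.mod n 3 = 0) (hn : n ≠ 0) :
    (PySem.Int.floordiv (n * 2) 3).natAbs < n.natAbs ∧ (PySem.Int.floordiv n 3).natAbs < n.natAbs ∧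
    PySem.Int.floordiv (n * 2) 3 ≠ 0 ∧ PySem.Int.floordiv n 3 ≠ 0 := by
  obtain ⟨k, hk⟩ := (PySem.Int.mod_eq_zero_iff_dvd n 3).1 h3
  have hl : PySem.Int.floordiv (n * 2) 3 = 2 * k := by
    rw [PySem.Int.floordiv_eq_ediv_of_pos (by norm_num : (0:Int) < 3), hk]
    rw [show 3 * k * 2 = 3 * (2 * k) by ring]
    exact Int.mul_ediv_cancel_left _ (by norm_num)
  have hr : PySem.Int.floordiv n 3 = k := by
    rw [PySem.Int.floordiv_eq_ediv_of_pos (by norm_num : (0:Int) < 3), hk]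
    exact Int.mul_ediv_cancel_left _ (by norm_num)
  have hk0 : k ≠ 0 := by rintro rfl; simp at hk; exact hn hk
  have h2 : (2 * k).natAbs = 2 * k.natAbs := by simp [Int.natAbs_mul]
  have h3' : n.natAbs = 3 * k.natAbs := by rw [hk]; simp [Int.natAbs_mul]
  have hka : 0 < k.natAbs := Int.natAbs_pos.2 hk0
  refine ⟨?_, ?_, ?_, ?_⟩
  · rw [hl, h2, h3']; omega
  · rw [hr, h3']; omega
  · rw [hl]; exact mul_ne_zero (by norm_num) hk0
  · rw [hr]; exact hk0

lemma pureF_zero_false (m : Int) (d : PySem.Dict Int Bool) (hm : (0:Int) ≠ m)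
    (hg : ¬((0:Int) < m ∨ PySem.Int.mod 0 3 ≠ 0)) (hd : d.get? 0 = none) :
    ∀ fuel, pureF fuel 0 m d = false := by
  intro fuel
  induction fuel with
  | zero => rfl
  | succ f ih =>
    simp only [pureF, if_neg hm, if_neg hg, hd]
    have h0 : PySem.Int.floordiv ((0:Int) * 2) 3 = 0 := by decide
    have h0' : PySem.Int.floordiv (0:Int) 3 = 0 := by decide
    rw [h0, h0', ih, Bool.or_self]

-- pureF is fuel-independent once the fuel exceeds |n|
lemma pureF_stable_zero (m : Int) (d : PySem.Dict Int Bool) (f₁ f₂ : Nat)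
    (h1 : 0 < f₁) (h2 : 0 < f₂) : pureF f₁ 0 m d = pureF f₂ 0 m d := by
  obtain ⟨a, rfl⟩ : ∃ a, f₁ = a + 1 := ⟨f₁ - 1, by omega⟩
  obtain ⟨b, rfl⟩ : ∃ b, f₂ = b + 1 := ⟨f₂ - 1, by omega⟩
  simp only [pureF]
  by_cases hm : (0:Int) = m
  · simp [hm]
  · simp only [if_neg hm]
    by_cases hg : (0:Int) < m ∨ PySem.Int.mod 0 3 ≠ 0
    · simp only [if_pos hg]
    · simp only [if_neg hg]
      cases hd : d.get? 0 with
      | some v => rfl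
      | none =>
        have h0 : PySem.Int.floordiv ((0:Int) * 2) 3 = 0 := by decide
        have h0' : PySem.Int.floordiv (0:Int) 3 = 0 := by decide
        rw [h0, h0', pureF_zero_false m d hm hg hd a, pureF_zero_false m d hm hg hd b]

-- pureF is fuel-independent once the fuel exceeds |n|
lemma pureF_stable : ∀ (N : Nat) (n m : Int) (d : PySem.Dict Int Bool) (f₁ f₂ : Nat),
    n.natAbs ≤ N → n.natAbs < f₁ → n.natAbs < f₂ → pureF f₁ n m d = pureF f₂ n m d := by
  intro N
  induction N with
  | zero =>
    intro n m d f₁ f₂ hN h1 h2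
    have hn : n = 0 := by omega
    subst hn
    exact pureF_stable_zero m d f₁ f₂ (by omega) (by omega)
  | succ N ih =>
    intro n m d f₁ f₂ hN h1 h2
    by_cases hn0 : n = 0
    · subst hn0; exact pureF_stable_zero m d f₁ f₂ (by omega) (by omega)
    obtain ⟨a, rfl⟩ : ∃ a, f₁ = a + 1 := ⟨f₁ - 1, by omega⟩
    obtain ⟨b, rfl⟩ : ∃ b, f₂ = b + 1 := ⟨f₂ - 1, by omega⟩
    simp only [pureF]
    by_cases hm : n = m
    · simp [hm]
    · simp only [if_neg hm]
      by_cases hg : n < m ∨ PySem.Int.mod n 3 ≠ 0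
      · simp only [if_pos hg]
      · simp only [if_neg hg]
        cases hd : d.get? n with
        | some v => rfl
        | none =>
          rw [not_or] at hg
          have h3 : PySem.Int.mod n 3 = 0 := by
            by_contra hc; exact hg.2 hc
          obtain ⟨hl, hr, -, -⟩ := child_arith n h3 hn0
          rw [ih _ m d a b (by omega) (by omega) (by omega),
              ih _ m d a b (by omega) (by omega) (by omega)]

-- expanding pureF at a node that recurses
lemma pureF_expand (v m : Int) (d : PySem.Dict Int Bool) (hv0 : v ≠ 0) (hm : v ≠ m)
    (hg : ¬(v < m ∨ PySem.Int.mod v 3 ≠ 0)) (hd : d.get? v = none) :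
    pureF (v.natAbs + 1) v m d =
      (pureF ((PySem.Int.floordiv (v * 2) 3).natAbs + 1) (PySem.Int.floordiv (v * 2) 3) m d ||
       pureF ((PySem.Int.floordiv v 3).natAbs + 1) (PySem.Int.floordiv v 3) m d) := by
  have h3 : PySem.Int.mod v 3 = 0 := by
    rw [not_or] at hg
    by_contra hc; exact hg.2 hc
  obtain ⟨hla, hra, -, -⟩ := child_arith v h3 hv0
  have hsl := pureF_stable v.natAbs (PySem.Int.floordiv (v * 2) 3) m d v.natAbs
    ((PySem.Int.floordiv (v * 2) 3).natAbs + 1) (by omega) (by omega) (by omega)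
  have hsr := pureF_stable v.natAbs (PySem.Int.floordiv v 3) m d v.natAbs
    ((PySem.Int.floordiv v 3).natAbs + 1) (by omega) (by omega) (by omega)
  conv_lhs => rw [pureF]
  rw [if_neg hm, if_neg hg, hd, hsl, hsr]

-- a "true leaf" of B's scan has pureF = true
lemma pureF_true_of_leaf (v m : Int) (d : PySem.Dict Int Bool)
    (h : v = m ∨ (¬(v < m ∨ PySem.Int.mod v 3 ≠ 0) ∧ d.get? v = some true)) :
    pureF (v.natAbs + 1) v m d = true := by
  by_cases hm : v = m
  · rw [pureF, if_pos hm]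
  · rcases h with h | ⟨hg, hd⟩
    · exact absurd h hm
    · rw [pureF, if_neg hm, if_neg hg, hd]

-- memo invariant: every entry of d is an entry of d0 or a correct memo value over d0
def DInv (m : Int) (d0 d : PySem.Dict Int Bool) : Prop :=
  ∀ k : Int, d.get? k = d0.get? k ∨ (d0.get? k = none ∧ d.get? k = some (pureF (k.natAbs + 1) k m d0))

lemma solveA_pure : ∀ (N : Nat) (n m : Int) (d0 d : PySem.Dict Int Bool) (fuel : Nat),
    n ≠ 0 → n.natAbs ≤ N → n.natAbs < fuel → DInv m d0 d →
    (solveA fuel n m d).1 = pureF (n.natAbs + 1) n m d0 ∧ DInv m d0 (solveA fuel n m d).2 := by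
  intro N
  induction N with
  | zero =>
    intro n m d0 d fuel hn hN _ _
    exact absurd (by omega : n = 0) hn
  | succ N ih =>
    intro n m d0 d fuel hn hN hf hInv
    obtain ⟨f, rfl⟩ : ∃ f, fuel = f + 1 := ⟨fuel - 1, by omega⟩
    by_cases hm : n = m
    · refine ⟨?_, ?_⟩
      · simp only [solveA, pureF, if_pos hm]
      · simp only [solveA, if_pos hm]; exact hInv
    by_cases hg : n < m ∨ PySem.Int.mod n 3 ≠ 0
    · refine ⟨?_, ?_⟩
      · simp only [solveA, pureF, if_neg hm, if_pos hg]
      · simp only [solveA, if_neg hm, if_pos hg]; exact hInv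
    cases hd : d.get? n with
    | some b =>
      refine ⟨?_, ?_⟩
      · simp only [solveA, if_neg hm, if_neg hg, hd]
        rcases hInv n with h | ⟨h0, hsome⟩
        · rw [hd] at h
          simp only [pureF, if_neg hm, if_neg hg, ← h]
        · rw [hd] at hsome
          exact (Option.some_inj.mp hsome)
      · simp only [solveA, if_neg hm, if_neg hg, hd]; exact hInv
    | none =>
      have hd0 : d0.get? n = none := by
        rcases hInv n with h | ⟨h0, _⟩
        · rw [← h, hd]
        · exact h0
      have h3 : PySem.Int.mod n 3 = 0 := by
        rw [not_or] at hg
        by_contra hc; exact hg.2 hc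
      obtain ⟨hla, hra, hl0, hr0⟩ := child_arith n h3 hn
      obtain ⟨hv1, hi1⟩ := ih (PySem.Int.floordiv (n * 2) 3) m d0 d f hl0 (by omega) (by omega) hInv
      have hpure := pureF_expand n m d0 hn hm hg hd0
      cases hb1 : (solveA f (PySem.Int.floordiv (n * 2) 3) m d).1 with
      | true =>
        have hval : pureF (n.natAbs + 1) n m d0 = true := by
          rw [hpure, ← hv1, hb1, Bool.true_or]
        refine ⟨?_, ?_⟩
        · simp only [solveA, if_neg hm, if_neg hg, hd, hb1, if_pos]
          exact hval.symm
        · simp only [solveA, if_neg hm, if_neg hg, hd, hb1, if_pos]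
          intro k
          by_cases hk : k = n
          · subst hk
            right
            refine ⟨hd0, ?_⟩
            rw [PySem.Dict.get?_insert, if_pos rfl, hval]
          · rw [PySem.Dict.get?_insert, if_neg hk]
            exact hi1 k
      | false =>
        obtain ⟨hv2, hi2⟩ := ih (PySem.Int.floordiv n 3) m d0
          (solveA f (PySem.Int.floordiv (n * 2) 3) m d).2 f hr0 (by omega) (by omega) hi1
        have hval : pureF (n.natAbs + 1) n m d0 =
            (solveA f (PySem.Int.floordiv n 3) m (solveA f (PySem.Int.floordiv (n * 2) 3) m d).2).1 := by
          rw [hpure, ← hv1, hb1, Bool.false_or, hv2]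
        refine ⟨?_, ?_⟩
        · simp only [solveA, if_neg hm, if_neg hg, hd, hb1, Bool.false_eq_true, if_false]
          exact hval.symm
        · simp only [solveA, if_neg hm, if_neg hg, hd, hb1, Bool.false_eq_true, if_false]
          intro k
          by_cases hk : k = n
          · subst hk
            right
            refine ⟨hd0, ?_⟩
            rw [PySem.Dict.get?_insert, if_pos rfl, hval]
          · rw [PySem.Dict.get?_insert, if_neg hk]
            exact hi2 k

lemma stepB_none_iff (m : Int) (d : PySem.Dict Int Bool) :
    ∀ (l : List Int) (acc : PySem.Set Int),
    stepB m d l acc = none ↔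
      ∃ v ∈ l, v = m ∨ (¬(v < m ∨ PySem.Int.mod v 3 ≠ 0) ∧ d.get? v = some true) := by
  intro l
  induction l with
  | nil => intro acc; simp [stepB]
  | cons v rest ih =>
    intro acc
    by_cases hm : v = m
    · simp only [stepB, if_pos hm]
      constructor
      · intro _; exact ⟨v, List.mem_cons_self, Or.inl hm⟩
      · intro _; trivial
    · simp only [stepB, if_neg hm]
      by_cases hg : v < m ∨ PySem.Int.mod v 3 ≠ 0
      · rw [if_pos hg, ih]
        constructor
        · rintro ⟨w, hw, hleaf⟩; exact ⟨w, List.mem_cons_of_mem _ hw, hleaf⟩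
        · rintro ⟨w, hw, hleaf⟩
          rcases List.mem_cons.mp hw with rfl | hw'
          · rcases hleaf with h | ⟨hg', -⟩
            · exact absurd h hm
            · exact absurd hg hg'
          · exact ⟨w, hw', hleaf⟩
      · rw [if_neg hg]
        cases hd : d.get? v with
        | some b =>
          cases b with
          | true =>
            constructor
            · intro _; exact ⟨v, List.mem_cons_self, Or.inr ⟨hg, hd⟩⟩
            · intro _; trivial
          | false =>
            simp only [Bool.false_eq_true, if_false, ih]
            constructor
            · rintro ⟨w, hw, hleaf⟩; exact ⟨w, List.mem_cons_of_mem _ hw, hleaf⟩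
            · rintro ⟨w, hw, hleaf⟩
              rcases List.mem_cons.mp hw with rfl | hw'
              · rcases hleaf with h | ⟨-, hd'⟩
                · exact absurd h hm
                · rw [hd] at hd'; simp at hd'
              · exact ⟨w, hw', hleaf⟩
        | none =>
          rw [ih]
          constructor
          · rintro ⟨w, hw, hleaf⟩; exact ⟨w, List.mem_cons_of_mem _ hw, hleaf⟩
          · rintro ⟨w, hw, hleaf⟩
            rcases List.mem_cons.mp hw with rfl | hw'
            · rcases hleaf with h | ⟨-, hd'⟩
              · exact absurd h hm
              · rw [hd] at hd'; simp at hd'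
            · exact ⟨w, hw', hleaf⟩

lemma stepB_some_mem (m : Int) (d : PySem.Dict Int Bool) :
    ∀ (l : List Int) (acc s : PySem.Set Int), stepB m d l acc = some s →
    ∀ y : Int, y ∈ s ↔ y ∈ acc ∨ ∃ v ∈ l, ¬(v < m ∨ PySem.Int.mod v 3 ≠ 0) ∧ d.get? v = none ∧
      (y = PySem.Int.floordiv (v * 2) 3 ∨ y = PySem.Int.floordiv v 3) := by
  intro l
  induction l with
  | nil =>
    intro acc s hs y
    simp only [stepB, Option.some_inj] at hs
    subst hs
    simp
  | cons v rest ih =>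
    intro acc s hs y
    by_cases hm : v = m
    · simp only [stepB, if_pos hm] at hs; simp at hs
    · simp only [stepB, if_neg hm] at hs
      by_cases hg : v < m ∨ PySem.Int.mod v 3 ≠ 0
      · rw [if_pos hg] at hs
        rw [ih acc s hs y]
        constructor
        · rintro (h | ⟨w, hw, hww⟩)
          · exact Or.inl h
          · exact Or.inr ⟨w, List.mem_cons_of_mem _ hw, hww⟩
        · rintro (h | ⟨w, hw, hww⟩)
          · exact Or.inl h
          · rcases List.mem_cons.mp hw with rfl | hw'
            · exact absurd hg hww.1
            · exact Or.inr ⟨w, hw', hww⟩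
      · rw [if_neg hg] at hs
        cases hd : d.get? v with
        | some b =>
          rw [hd] at hs
          cases b with
          | true => simp at hs
          | false =>
            simp only [Bool.false_eq_true, if_false] at hs
            rw [ih _ s hs y]
            constructor
            · rintro (h | ⟨w, hw, hww⟩)
              · exact Or.inl h
              · exact Or.inr ⟨w, List.mem_cons_of_mem _ hw, hww⟩
            · rintro (h | ⟨w, hw, hww⟩)
              · exact Or.inl h
              · rcases List.mem_cons.mp hw with rfl | hw'
                · rw [hd] at hww; simp at hww
                · exact Or.inr ⟨w, hw', hww⟩
        | none =>
          rw [hd] at hs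
          rw [ih _ s hs y]
          rw [PySem.Set.mem_add, PySem.Set.mem_add]
          constructor
          · rintro (((h | h) | h) | ⟨w, hw, hww⟩)
            · exact Or.inl h
            · exact Or.inr ⟨v, List.mem_cons_self, hg, hd, Or.inl h⟩
            · exact Or.inr ⟨v, List.mem_cons_self, hg, hd, Or.inr h⟩
            · exact Or.inr ⟨w, List.mem_cons_of_mem _ hw, hww⟩
          · rintro (h | ⟨w, hw, hww⟩)
            · exact Or.inl (Or.inl (Or.inl h))
            · rcases List.mem_cons.mp hw with rfl | hw'
              · rcases hww.2.2 with h | h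
                · exact Or.inl (Or.inl (Or.inr h))
                · exact Or.inl (Or.inr h)
              · exact Or.inr ⟨w, hw', hww⟩

lemma loopB_eq (m : Int) (d : PySem.Dict Int Bool) :
    ∀ (fuel : Nat) (frontier : PySem.Set Int),
    (∀ v ∈ frontier, v ≠ 0 ∧ v.natAbs < fuel) →
    loopB m d fuel frontier = frontier.any (fun v => pureF (v.natAbs + 1) v m d) := by
  intro fuel
  induction fuel with
  | zero =>
    intro frontier h
    cases frontier with
    | nil => rfl
    | cons x xs => exact absurd (h x List.mem_cons_self).2 (by omega)
  | succ f ih =>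
    intro frontier h
    by_cases hfr : frontier = []
    · subst hfr; rfl
    · simp only [loopB, if_neg hfr]
      cases hs : stepB m d frontier PySem.Set.empty with
      | none =>
        obtain ⟨v, hv, hleaf⟩ := (stepB_none_iff m d frontier PySem.Set.empty).mp hs
        exact (List.any_eq_true.mpr ⟨v, hv, pureF_true_of_leaf v m d hleaf⟩).symm
      | some ch =>
        have hnoleaf : ¬ ∃ v ∈ frontier,
            v = m ∨ (¬(v < m ∨ PySem.Int.mod v 3 ≠ 0) ∧ d.get? v = some true) := by
          intro hcon
          rw [(stepB_none_iff m d frontier PySem.Set.empty).mpr hcon] at hs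
          simp at hs
        have hmem := stepB_some_mem m d frontier PySem.Set.empty ch hs
        have hch : ∀ y ∈ ch, y ≠ 0 ∧ y.natAbs < f := by
          intro y hy
          rcases (hmem y).mp hy with h | ⟨v, hv, hg, -, hchild⟩
          · exact absurd h (by simp [PySem.Set.empty])
          · obtain ⟨hv0, hvf⟩ := h v hv
            have h3 : PySem.Int.mod v 3 = 0 := by
              rw [not_or] at hg
              by_contra hc; exact hg.2 hc
            obtain ⟨hla, hra, hl0, hr0⟩ := child_arith v h3 hv0
            rcases hchild with rfl | rfl
            · exact ⟨hl0, by omega⟩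
            · exact ⟨hr0, by omega⟩
        change loopB m d f ch = _
        rw [ih ch hch]
        rw [Bool.eq_iff_iff, List.any_eq_true, List.any_eq_true]
        constructor
        · rintro ⟨y, hy, hpy⟩
          rcases (hmem y).mp hy with h | ⟨v, hv, hg, hd', hchild⟩
          · exact absurd h (by simp [PySem.Set.empty])
          · refine ⟨v, hv, ?_⟩
            obtain ⟨hv0, -⟩ := h v hv
            have hvm : v ≠ m := fun he => hnoleaf ⟨v, hv, Or.inl he⟩
            rw [pureF_expand v m d hv0 hvm hg hd']
            rcases hchild with rfl | rfl
            · rw [hpy, Bool.true_or]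
            · rw [hpy, Bool.or_true]
        · rintro ⟨v, hv, hpv⟩
          obtain ⟨hv0, -⟩ := h v hv
          have hvm : v ≠ m := fun he => hnoleaf ⟨v, hv, Or.inl he⟩
          by_cases hg : v < m ∨ PySem.Int.mod v 3 ≠ 0
          · rw [pureF, if_neg hvm, if_pos hg] at hpv
            exact Bool.noConfusion hpv
          · cases hd' : d.get? v with
            | some b =>
              cases b with
              | true => exact absurd ⟨v, hv, Or.inr ⟨hg, hd'⟩⟩ hnoleaf
              | false =>
                rw [pureF, if_neg hvm, if_neg hg, hd'] at hpv
                exact Bool.noConfusion hpv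
            | none =>
              rw [pureF_expand v m d hv0 hvm hg hd'] at hpv
              rcases Bool.or_eq_true_iff.mp hpv with hp | hp
              · exact ⟨_, (hmem _).mpr (Or.inr ⟨v, hv, hg, hd', Or.inl rfl⟩), hp⟩
              · exact ⟨_, (hmem _).mpr (Or.inr ⟨v, hv, hg, hd', Or.inr rfl⟩), hp⟩

-- ===== VERDICT (by name: the statement is the Claim_ definition above) =====
theorem solve_spec : Claim_equal_solve := by
  intro n m dp _ hpre
  unfold Spec_solve solve solve_alt
  by_cases hn : n = 0
  · subst hn
    have hof : PySem.Set.ofList [(0:Int)] = [(0:Int)] := rfl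
    rw [hof]
    by_cases hm0 : (0:Int) = m
    · simp only [solveA, loopB, stepB, if_pos hm0]
      simp
    · by_cases hmlt : (0:Int) < m
      · have hguard : (0:Int) < m ∨ PySem.Int.mod 0 3 ≠ 0 := Or.inl hmlt
        simp only [solveA, if_neg hm0, if_pos hguard, loopB, stepB]
        rfl
      · -- m < 0 (and 0 ≠ m): Pre_ guarantees a memo entry for 0
        have hmem : (0 : Int) ∈ dp.map Prod.fst := by
          rcases hpre rfl with h | h
          · exact absurd (lt_of_le_of_ne h hm0) hmlt
          · exact h
        have hne : (PySem.Dict.mk dp).get? 0 ≠ none := by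
          intro h0
          rw [PySem.Dict.get?_eq_none_iff_not_mem_keys] at h0
          exact h0 (by simpa [PySem.Dict.keys] using hmem)
        obtain ⟨b, hb⟩ : ∃ b, (PySem.Dict.mk dp).get? 0 = some b := by
          cases hg : (PySem.Dict.mk dp).get? 0 with
          | none => exact absurd hg hne
          | some b => exact ⟨b, rfl⟩
        have hguard : ¬((0:Int) < m ∨ PySem.Int.mod 0 3 ≠ 0) := by
          rw [not_or]
          exact ⟨hmlt, by decide⟩
        simp only [solveA, if_neg hm0, if_neg hguard, hb, loopB, stepB]
        cases b with
        | true => simp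
        | false => simp [loopB]
  · have h1 := solveA_pure n.natAbs n m (PySem.Dict.mk dp) (PySem.Dict.mk dp) (n.natAbs + 1)
      hn le_rfl (by omega) (fun k => Or.inl rfl)
    rw [h1.1]
    have hof : PySem.Set.ofList [n] = [n] :=
      PySem.Set.ofList_eq_self_of_nodup [n] (by simp)
    rw [hof]
    rw [loopB_eq m (PySem.Dict.mk dp) (n.natAbs + 1) [n]
      (by intro v hv; rw [List.mem_singleton] at hv; subst hv; exact ⟨hn, by omega⟩)]
    simp
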